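-- pv_equiv track=rewrite | github.com/kusanagi/kusanagi-sdk-python | kusanagi/sdk/lib/version.py | compare_sub_parts
-- ===== SOURCE A (Python) =====
-- GREATER = 1
--
-- EQUAL = 0
--
-- LOWER = -1
--
-- def compare_sub_parts(sub1: str, sub2: str) -> int:
--     # Sub parts are equal
--     if sub1 == sub2:
--         return EQUAL
--
--     # Check if any sub part is an integer
--     is_integer = [False, False]
--     for idx, value in enumerate((sub1, sub2)):
--         try:
--             int(value)
--         except ValueError:
--             is_integer[idx] = False
--         else:
--             is_integer[idx] = True
--
--     # Compare both sub parts according to their type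
--     if is_integer[0] != is_integer[1]:
--         # One is an integer. The integer is higher than the non integer.
--         # Check if the first sub part is an integer, and if so it means
--         # sub2 is lower than sub1.
--         return LOWER if is_integer[0] else GREATER
--
--     # Both sub parts are of the same type
--     return GREATER if sub1 < sub2 else LOWER
-- ===== SOURCE B (Python) =====
-- def compare_sub_parts(sub1: str, sub2: str) -> int:
--     def as_int(s):
--         try:
--             return int(s)
--         except ValueError:
--             return None
--
--     a = as_int(sub1)
--     b = as_int(sub2)
--     if a is not None and b is not None:
--         # Both are integers: compare them numerically (positive = sub2 greater).
--         return (a < b) - (a > b)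
--     if a is not None:
--         return -1
--     if b is not None:
--         return 1
--     if sub1 == sub2:
--         return 0
--     return 1 if sub1 < sub2 else -1
-- ===== Notes on version B (the rewrite author's own statement) =====
-- stated objective: alternative
-- what changed: B parses both sub-parts to integer values up front and compares two integer sub-parts numerically via a sign expression (a < b) - (a > b), instead of A's flag-list/enumerate type classification followed by a string comparison even for integers.
-- intended difference: On pairs where both sub-parts parse as integers but string order disagrees with numeric order (e.g. '2' vs '10', or '+5' vs '5'), A returns the string-order sign (-1 for '2' vs '10') while B returns the numeric-order sign (1), which is the intended result when comparing numeric version sub-parts. — e.g. on compare_sub_parts("2", "10"): A returns -1, B returns 1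
import Mathlib
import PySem

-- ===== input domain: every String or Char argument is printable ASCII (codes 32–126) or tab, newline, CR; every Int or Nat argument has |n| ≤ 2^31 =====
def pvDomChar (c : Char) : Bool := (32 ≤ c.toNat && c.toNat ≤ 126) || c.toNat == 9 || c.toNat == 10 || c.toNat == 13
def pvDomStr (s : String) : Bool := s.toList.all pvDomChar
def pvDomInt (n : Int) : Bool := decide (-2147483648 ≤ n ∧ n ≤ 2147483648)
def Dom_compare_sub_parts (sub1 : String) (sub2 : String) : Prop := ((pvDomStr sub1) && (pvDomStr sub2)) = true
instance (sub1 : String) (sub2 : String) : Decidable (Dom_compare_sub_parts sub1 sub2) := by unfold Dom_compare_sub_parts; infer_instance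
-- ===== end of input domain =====

-- B parses both sub-parts once and compares two integer sub-parts NUMERICALLY
-- (A compares them as strings); elsewhere it matches A. The difference is stated in D_ below.

-- ===== PORT A =====
def compare_sub_parts (sub1 : String) (sub2 : String) : Int :=
  -- Sub parts are equal
  if sub1 = sub2 then 0
  else
    -- Check if any sub part is an integer (int(value) succeeds ↔ ofStr? is some)
    let is_integer : List Bool :=
      (PySem.List.enumerate [sub1, sub2] 0).foldl
        (fun acc p => acc.set p.1.toNat (PySem.Int.ofStr? p.2).isSome) [false, false]
    -- Compare both sub parts according to their type
    if is_integer.getD 0 false ≠ is_integer.getD 1 false then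
      (if is_integer.getD 0 false then -1 else 1)
    else
      -- Both sub parts are of the same type
      if sub1 < sub2 then 1 else -1

-- ===== PORT B =====
-- as_int(s): some n when int(s) succeeds, none on ValueError
def pvAsInt (s : String) : Option Int := PySem.Int.ofStr? s

def compare_sub_parts_alt (sub1 : String) (sub2 : String) : Int :=
  let a := pvAsInt sub1
  let b := pvAsInt sub2
  match a, b with
  | some x, some y =>
      -- both integers: numeric comparison, (a < b) - (a > b)
      (if x < y then (1 : Int) else 0) - (if x > y then 1 else 0)
  | some _, none => -1
  | none, some _ => 1
  | none, none =>
      if sub1 = sub2 then 0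
      else if sub1 < sub2 then 1 else -1

-- ===== PRECONDITION & SPEC =====
-- On pairs where both sub-parts parse as integers but their string order disagrees with
-- their numeric order (e.g. '2' vs '10'), A returns the string-order sign and B returns the
-- numeric-order sign, which is the intended result for comparing version sub-parts.
def D_compare_sub_parts (sub1 : String) (sub2 : String) : Prop :=
  (PySem.Int.ofStr? sub1).isSome = true ∧ (PySem.Int.ofStr? sub2).isSome = true ∧
  ¬ ((sub1 < sub2 ↔ (PySem.Int.ofStr? sub1).getD 0 < (PySem.Int.ofStr? sub2).getD 0) ∧
     (sub2 < sub1 ↔ (PySem.Int.ofStr? sub2).getD 0 < (PySem.Int.ofStr? sub1).getD 0))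
instance (sub1 : String) (sub2 : String) : Decidable (D_compare_sub_parts sub1 sub2) := by
  unfold D_compare_sub_parts; infer_instance

def Spec_compare_sub_parts (sub1 : String) (sub2 : String) (out : Int) : Prop :=
  ¬ D_compare_sub_parts sub1 sub2 → out = compare_sub_parts_alt sub1 sub2
instance (sub1 : String) (sub2 : String) (out : Int) : Decidable (Spec_compare_sub_parts sub1 sub2 out) := by
  unfold Spec_compare_sub_parts; infer_instance

def pvDiffWitness_compare_sub_parts : String × String := ("2", "10")
def pvDiffWitnessOut_compare_sub_parts : Int × Int := (-1, 1)

-- ===== CLAIM (what is proved, stated in full; the proofs are below) =====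
def Claim_unchanged_compare_sub_parts : Prop := ∀ (sub1 : String) (sub2 : String), Dom_compare_sub_parts sub1 sub2 → Spec_compare_sub_parts sub1 sub2 (compare_sub_parts sub1 sub2)
def Claim_changed_compare_sub_parts : Prop := Dom_compare_sub_parts (pvDiffWitness_compare_sub_parts.1) (pvDiffWitness_compare_sub_parts.2) ∧ D_compare_sub_parts (pvDiffWitness_compare_sub_parts.1) (pvDiffWitness_compare_sub_parts.2) ∧ compare_sub_parts (pvDiffWitness_compare_sub_parts.1) (pvDiffWitness_compare_sub_parts.2) = pvDiffWitnessOut_compare_sub_parts.1 ∧ compare_sub_parts_alt (pvDiffWitness_compare_sub_parts.1) (pvDiffWitness_compare_sub_parts.2) = pvDiffWitnessOut_compare_sub_parts.2 ∧ pvDiffWitnessOut_compare_sub_parts.1 ≠ pvDiffWitnessOut_compare_sub_parts.2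
def Claim_exact_compare_sub_parts : Prop := ∀ (sub1 : String) (sub2 : String), Dom_compare_sub_parts sub1 sub2 → D_compare_sub_parts sub1 sub2 → compare_sub_parts sub1 sub2 ≠ compare_sub_parts_alt sub1 sub2

-- ===== LEMMAS AND PROOFS =====

-- int(sub1) = int(sub2) when the strings are equal
theorem pv_parse_congr (s t : String) (h : s = t) : PySem.Int.ofStr? s = PySem.Int.ofStr? t := by
  rw [h]

-- A's value, written without the flag list
theorem pvA_eval (sub1 sub2 : String) :
    compare_sub_parts sub1 sub2 =
      if sub1 = sub2 then 0
      else if (PySem.Int.ofStr? sub1).isSome ≠ (PySem.Int.ofStr? sub2).isSome then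
        (if (PySem.Int.ofStr? sub1).isSome then -1 else 1)
      else if sub1 < sub2 then 1 else -1 := by
  unfold compare_sub_parts
  simp [PySem.List.enumerate]

-- ===== VERDICT (by name: the statement is the Claim_ definition above) =====
theorem compare_sub_parts_spec : Claim_unchanged_compare_sub_parts := by
  intro sub1 sub2 _ hD
  rw [pvA_eval]
  unfold compare_sub_parts_alt pvAsInt
  unfold D_compare_sub_parts at hD
  rcases h1 : PySem.Int.ofStr? sub1 with _ | x <;>
  rcases h2 : PySem.Int.ofStr? sub2 with _ | y <;>
  simp only [h1, h2, Option.isSome, Option.getD] at hD ⊢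
  · -- none / none: identical string comparison on both sides
    by_cases he : sub1 = sub2 <;> simp [he]
  · -- none / some
    have hne : sub1 ≠ sub2 := fun he => by
      rw [pv_parse_congr _ _ he, h2] at h1; cases h1
    simp [hne]
  · -- some / none
    have hne : sub1 ≠ sub2 := fun he => by
      rw [pv_parse_congr _ _ he, h2] at h1; cases h1
    simp [hne]
  · -- some / some, with ¬ D: string order agrees with numeric order
    obtain ⟨hlt, hgt⟩ : (sub1 < sub2 ↔ x < y) ∧ (sub2 < sub1 ↔ y < x) := by
      by_contra hc; exact hD ⟨trivial, trivial, hc⟩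
    by_cases he : sub1 = sub2
    · have hxy : x = y := by
        have := pv_parse_congr _ _ he; rw [h1, h2] at this; exact Option.some_inj.mp this
      subst hxy
      simp [he]
    · rcases lt_trichotomy sub1 sub2 with h | h | h
      · have : x < y := hlt.mp h
        simp [he, h, this, not_lt_of_gt this]
      · exact absurd h he
      · have hyx : y < x := hgt.mp h
        have hns : ¬ sub1 < sub2 := lt_asymm h
        simp [he, hns, hyx, not_lt_of_gt hyx]

theorem compare_sub_parts_changed : Claim_changed_compare_sub_parts := by
  unfold Claim_changed_compare_sub_parts pvDiffWitness_compare_sub_parts pvDiffWitnessOut_compare_sub_parts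
  have hlt : ¬ (("2" : String) < "10") := by rw [String.lt_iff_toList_lt]; decide
  refine ⟨by decide, ?_, ?_, by decide, by decide⟩
  · exact ⟨by decide, by decide, fun hc => hlt (hc.1.mpr (by decide))⟩
  · rw [pvA_eval]
    simp [hlt, show ("2" : String) ≠ "10" by decide,
          show (PySem.Int.ofStr? "2").isSome = true by decide,
          show (PySem.Int.ofStr? "10").isSome = true by decide]

theorem compare_sub_parts_tight : Claim_exact_compare_sub_parts := by
  intro sub1 sub2 _ hD
  rw [pvA_eval]
  unfold compare_sub_parts_alt pvAsInt
  unfold D_compare_sub_parts at hD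
  rcases h1 : PySem.Int.ofStr? sub1 with _ | x <;>
  rcases h2 : PySem.Int.ofStr? sub2 with _ | y <;>
  simp only [h1, h2, Option.isSome, Option.getD] at hD ⊢
  · exact absurd hD.1 (by simp)
  · exact absurd hD.1 (by simp)
  · exact absurd hD.2.1 (by simp)
  · -- some / some: the two sign values differ exactly when the orders disagree
    replace hD := hD.2.2
    have hne : sub1 ≠ sub2 := by
      intro he
      have := pv_parse_congr _ _ he; rw [h1, h2] at this
      have hxy : x = y := Option.some_inj.mp this
      subst hxy; subst he
      exact hD ⟨by simp, by simp⟩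
    rcases lt_trichotomy sub1 sub2 with h | h | h
    · rcases lt_trichotomy x y with hxy | hxy | hxy
      · exact absurd ⟨⟨fun _ => hxy, fun _ => h⟩,
          ⟨fun hc => absurd hc (lt_asymm h), fun hc => absurd hc (lt_asymm hxy)⟩⟩ hD
      · subst hxy
        simp [hne, h]
      · simp [hne, h, not_lt_of_gt hxy, hxy]
    · exact absurd h hne
    · have hns : ¬ sub1 < sub2 := lt_asymm h
      rcases lt_trichotomy x y with hxy | hxy | hxy
      · simp [hne, hns, hxy, not_lt_of_gt hxy]
      · subst hxy
        simp [hne, hns]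
      · exact absurd ⟨⟨fun hc => absurd hc hns, fun hc => absurd hc (lt_asymm hxy)⟩,
          ⟨fun _ => hxy, fun _ => h⟩⟩ hD
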